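-- pv_equiv track=rewrite | github.com/Vikvas6/PythonAlg | Task 1.py | func_onecycle
-- ===== SOURCE A (Python) =====
-- def func_onecycle(n=99):
--     result = [0] * 8
--     for n in range(2, n+1):
--         if n % 2 == 0:
--             result[0] += 1
--         if n % 3 == 0:
--             result[1] += 1
--         if n % 4 == 0:
--             result[2] += 1
--         if n % 5 == 0:
--             result[3] += 1
--         if n % 6 == 0:
--             result[4] += 1
--         if n % 7 == 0:
--             result[5] += 1
--         if n % 8 == 0:
--             result[6] += 1
--         if n % 9 == 0:
--             result[7] += 1
--     return result
-- ===== SOURCE B (Python) =====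
-- def func_onecycle(n=99):
--     m = max(n, 1)
--     return [m // k for k in range(2, 10)]
-- ===== Notes on version B (the rewrite author's own statement) =====
-- stated objective: faster
-- what changed: Replaces the O(n) loop counting multiples of 2..9 over range(2, n+1) with the closed form floor(n/k) for each k (clamped at n=1 so inputs below 2 yield zeros like the empty loop).
import Mathlib
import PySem

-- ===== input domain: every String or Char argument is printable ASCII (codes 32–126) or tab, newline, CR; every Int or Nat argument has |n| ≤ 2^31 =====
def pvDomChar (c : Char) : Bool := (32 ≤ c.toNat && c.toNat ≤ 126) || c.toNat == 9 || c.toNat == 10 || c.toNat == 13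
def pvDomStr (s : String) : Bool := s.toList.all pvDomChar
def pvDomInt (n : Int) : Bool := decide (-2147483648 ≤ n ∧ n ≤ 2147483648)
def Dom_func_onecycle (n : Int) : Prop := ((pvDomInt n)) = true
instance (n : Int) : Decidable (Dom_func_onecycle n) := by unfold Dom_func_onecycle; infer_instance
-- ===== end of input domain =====

-- B replaces A's O(n) counting loop by the closed form floor(n/k) for k = 2..9 (asymptotically faster).


-- ===== PORT A =====
-- one loop iteration: each 'if n % k == 0: result[i] += 1' in order (each touches its own index)
def pyStepA (r : List Int) (k : Int) : List Int :=
  match r with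
  | [a, b, c, d, e, f, g, h] =>
    [ if PySem.Int.mod k 2 = 0 then a + 1 else a,
      if PySem.Int.mod k 3 = 0 then b + 1 else b,
      if PySem.Int.mod k 4 = 0 then c + 1 else c,
      if PySem.Int.mod k 5 = 0 then d + 1 else d,
      if PySem.Int.mod k 6 = 0 then e + 1 else e,
      if PySem.Int.mod k 7 = 0 then f + 1 else f,
      if PySem.Int.mod k 8 = 0 then g + 1 else g,
      if PySem.Int.mod k 9 = 0 then h + 1 else h ]
  | r => r

def func_onecycle (n : Int) : List Int :=
  (PySem.List.pyRange 2 (n + 1) 1).foldl pyStepA (List.replicate 8 0)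

-- ===== PORT B =====
def func_onecycle_alt (n : Int) : List Int :=
  let m := max n 1
  (PySem.List.pyRange 2 10 1).map (fun k => PySem.Int.floordiv m k)

-- ===== PRECONDITION & SPEC =====
def Spec_func_onecycle (n : Int) (out : List Int) : Prop := out = func_onecycle_alt n
instance (n : Int) (out : List Int) : Decidable (Spec_func_onecycle n out) := by unfold Spec_func_onecycle; infer_instance

-- ===== CLAIM (what is proved, stated in full; the proofs are below) =====
def Claim_equal_func_onecycle : Prop := ∀ (n : Int), Dom_func_onecycle n → Spec_func_onecycle n (func_onecycle n)

-- ===== LEMMAS AND PROOFS =====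

lemma divs_of (m : Int) :
    [PySem.Int.floordiv m 2, PySem.Int.floordiv m 3, PySem.Int.floordiv m 4,
     PySem.Int.floordiv m 5, PySem.Int.floordiv m 6, PySem.Int.floordiv m 7,
     PySem.Int.floordiv m 8, PySem.Int.floordiv m 9] =
    (PySem.List.pyRange 2 10 1).map (fun k => PySem.Int.floordiv m k) := by
  have h : PySem.List.pyRange 2 10 1 = [2, 3, 4, 5, 6, 7, 8, 9] := by decide
  simp [h]

lemma loop_closed_form (m : Int) (hm : 1 ≤ m) :
    (PySem.List.pyRange 2 (m + 1) 1).foldl pyStepA (List.replicate 8 0) =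
    [PySem.Int.floordiv m 2, PySem.Int.floordiv m 3, PySem.Int.floordiv m 4,
     PySem.Int.floordiv m 5, PySem.Int.floordiv m 6, PySem.Int.floordiv m 7,
     PySem.Int.floordiv m 8, PySem.Int.floordiv m 9] := by
  induction m, hm using Int.le_induction with
  | base => decide
  | succ m hm ih =>
    rw [show m + 1 + 1 = (m + 1) + 1 from rfl,
        PySem.List.pyRange_one_succ_right (by omega : (2 : Int) ≤ m + 1),
        List.foldl_append, ih]
    simp only [List.foldl_cons, List.foldl_nil, pyStepA]
    simp only [PySem.Int.mod_eq_emod_of_pos (by norm_num : (0:Int) < 2),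
      PySem.Int.mod_eq_emod_of_pos (by norm_num : (0:Int) < 3),
      PySem.Int.mod_eq_emod_of_pos (by norm_num : (0:Int) < 4),
      PySem.Int.mod_eq_emod_of_pos (by norm_num : (0:Int) < 5),
      PySem.Int.mod_eq_emod_of_pos (by norm_num : (0:Int) < 6),
      PySem.Int.mod_eq_emod_of_pos (by norm_num : (0:Int) < 7),
      PySem.Int.mod_eq_emod_of_pos (by norm_num : (0:Int) < 8),
      PySem.Int.mod_eq_emod_of_pos (by norm_num : (0:Int) < 9),
      PySem.Int.floordiv_eq_ediv_of_pos (by norm_num : (0:Int) < 2),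
      PySem.Int.floordiv_eq_ediv_of_pos (by norm_num : (0:Int) < 3),
      PySem.Int.floordiv_eq_ediv_of_pos (by norm_num : (0:Int) < 4),
      PySem.Int.floordiv_eq_ediv_of_pos (by norm_num : (0:Int) < 5),
      PySem.Int.floordiv_eq_ediv_of_pos (by norm_num : (0:Int) < 6),
      PySem.Int.floordiv_eq_ediv_of_pos (by norm_num : (0:Int) < 7),
      PySem.Int.floordiv_eq_ediv_of_pos (by norm_num : (0:Int) < 8),
      PySem.Int.floordiv_eq_ediv_of_pos (by norm_num : (0:Int) < 9)]
    refine List.ext_getElem (by simp) ?_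
    intro i h1 h2
    simp only [List.length_cons, List.length_nil] at h1
    interval_cases i <;> simp <;> split_ifs <;> omega

lemma pyRange_nil_of_le (a b : Int) (h : b ≤ a) : PySem.List.pyRange a b 1 = [] := by
  simp [PySem.List.pyRange]
  omega

-- ===== VERDICT (by name: the statement is the Claim_ definition above) =====
theorem func_onecycle_spec : Claim_equal_func_onecycle := by
  intro n _
  unfold Spec_func_onecycle func_onecycle func_onecycle_alt
  by_cases h : 1 ≤ n
  · rw [loop_closed_form n h, show max n 1 = n from by omega]
    exact divs_of n
  · rw [pyRange_nil_of_le 2 (n + 1) (by omega), show max n 1 = 1 from by omega]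
    decide
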